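-- pv_equiv track=rewrite | github.com/Aasthaengg/IBMdataset | Python_codes/p03427/s016443179.py | myAnswer
-- ===== SOURCE A (Python) =====
-- def myAnswer(N:int)->int:
--    length = len(str(N))
--    if(length == 1): return N
--    l = list(str(N))
--    tmp = 0
--    for n in l[1:]:
--       tmp += int(n)
--    total = length * 9
--    if(tmp == total - 9):
--       return tmp + int(l[0])
--    else:
--       total += -9 + int(l[0]) - 1
--       return total
-- ===== SOURCE B (Python) =====
-- def myAnswer(N: int) -> int:
--     # recursive digit DP: best digit sum reachable by a number in [0, N]
--     if N < 10:
--         return N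
--     q, r = N // 10, N % 10
--     return max(r + myAnswer(q), 9 + myAnswer(q - 1))
-- ===== Notes on version B (the rewrite author's own statement) =====
-- stated objective: alternative
-- what changed: B drops the string/digit-list processing entirely and computes the answer by an arithmetic recursion on N via divmod: best(N) = N for N < 10, else max(N%10 + best(N//10), 9 + best(N//10 - 1)) — a digit DP over the value instead of A's branch on whether the decimal tail is all nines.
import Mathlib
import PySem

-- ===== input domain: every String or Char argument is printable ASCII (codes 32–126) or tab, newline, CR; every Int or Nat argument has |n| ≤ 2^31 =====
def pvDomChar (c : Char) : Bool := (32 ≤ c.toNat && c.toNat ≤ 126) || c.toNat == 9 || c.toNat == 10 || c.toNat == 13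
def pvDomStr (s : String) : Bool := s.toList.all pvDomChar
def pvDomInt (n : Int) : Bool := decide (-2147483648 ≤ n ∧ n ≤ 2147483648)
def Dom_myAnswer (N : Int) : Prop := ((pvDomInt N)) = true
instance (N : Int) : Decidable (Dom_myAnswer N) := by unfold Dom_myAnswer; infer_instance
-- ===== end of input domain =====

-- B replaces A's string-digit branch arithmetic by a string-free arithmetic recursion on N
-- (max over last-digit choices via divmod); alternative decomposition, same cost.
-- Pre_ excludes negative N, where A raises ValueError (int('-')).


-- ===== PORT A =====
-- int(c) for a single decimal-digit char; exact on Pre_'s domain (str(N) for N ≥ 0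
-- consists of chars '0'..'9' only).
def pvDigit (c : Char) : Int := (c.toNat : Int) - 48

def myAnswer (N : Int) : Int :=
  let s := PySem.Int.toChars N                 -- str(N)
  let length : Int := s.length                 -- len(str(N))
  if length = 1 then N
  else
    let l := s                                 -- list(str(N))
    let tmp := (PySem.List.slice l (some 1) none).foldl (fun acc c => acc + pvDigit c) 0
    let total := length * 9
    if tmp = total - 9 then tmp + pvDigit (PySem.List.pyGetD l 0 '0')
    else total + (-9 + pvDigit (PySem.List.pyGetD l 0 '0') - 1)

-- ===== PORT B =====
-- recursive digit DP: best digit sum reachable by a number in [0, N]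
def myAnswer_alt (N : Int) : Int :=
  if N < 10 then N
  else
    let q := PySem.Int.floordiv N 10
    let r := PySem.Int.mod N 10
    max (r + myAnswer_alt q) (9 + myAnswer_alt (q - 1))
termination_by N.toNat
decreasing_by
  all_goals
    simp only [PySem.Int.floordiv_eq_ediv_of_pos (by norm_num : (0:Int) < 10)]
    omega

-- ===== PRECONDITION & SPEC =====
-- A raises ValueError on every negative N (it runs int on the chars of str(N), and int('-') raises).
def Pre_myAnswer (N : Int) : Prop := 0 ≤ N
instance (N : Int) : Decidable (Pre_myAnswer N) := by unfold Pre_myAnswer; infer_instance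
def pvWitness_myAnswer : Int := 1234

def Spec_myAnswer (N : Int) (out : Int) : Prop := out = myAnswer_alt N
instance (N : Int) (out : Int) : Decidable (Spec_myAnswer N out) := by unfold Spec_myAnswer; infer_instance

-- ===== CLAIM (what is proved, stated in full; the proofs are below) =====
def Claim_equal_myAnswer : Prop := ∀ (N : Int), Dom_myAnswer N → Pre_myAnswer N → Spec_myAnswer N (myAnswer N)

-- ===== LEMMAS AND PROOFS =====

-- digit-statistics of a natural number (sum of digits, number of digits, leading digit), as Int
def dS (n : Nat) : Int := ((Nat.digits 10 n).sum : Int)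
def dL (n : Nat) : Int := ((Nat.digits 10 n).length : Int)
def dF (n : Nat) : Int := (((Nat.digits 10 n).getLastD 0 : Nat) : Int)

-- the common closed form both ports are reduced to
def G (n : Nat) : Int := if n < 10 then (n : Int) else max (dS n) (9 * (dL n - 1) + dF n - 1)

-- `Nat.toDigits` agrees with `Nat.digits` (reversed, rendered as chars) on positive input
lemma toDigitsCore_eq_digits (f : Nat) : ∀ (n : Nat) (l : List Char), 1 ≤ n → n < f →
    Nat.toDigitsCore 10 f n l = ((Nat.digits 10 n).map Nat.digitChar).reverse ++ l := by
  induction f with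
  | zero => intro n l h1 h2; omega
  | succ f ih =>
    intro n l h1 h2
    rw [Nat.digits_def' (by norm_num) (by omega)]
    simp only [Nat.toDigitsCore]
    by_cases h : n / 10 = 0
    · simp [h]
    · rw [if_neg h, ih (n / 10) _ (by omega) (by
        have := Nat.div_lt_self (by omega : 0 < n) (by norm_num : 1 < 10); omega)]
      simp

lemma toDigits_eq_digits (n : Nat) (h : 1 ≤ n) :
    Nat.toDigits 10 n = ((Nat.digits 10 n).map Nat.digitChar).reverse := by
  have := toDigitsCore_eq_digits (n + 1) n [] h (by omega)
  simpa [Nat.toDigits] using this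

lemma pvDigit_digitChar (d : Nat) (h : d < 10) : pvDigit (Nat.digitChar d) = (d : Int) := by
  interval_cases d <;> decide

-- folding `+ pvDigit` is summing the mapped digits
lemma foldl_eq_sum_map (l : List Char) (a : Int) :
    l.foldl (fun acc c => acc + pvDigit c) a = a + (l.map pvDigit).sum := by
  induction l generalizing a with
  | nil => simp
  | cons c cs ih => simp [ih (a + pvDigit c)]; ring

lemma getLastD_cons_of_ne_nil {α : Type} (a d : α) (l : List α) (h : l ≠ []) :
    (a :: l).getLastD d = l.getLastD d := by
  cases l with
  | nil => exact absurd rfl h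
  | cons b t => simp [List.getLastD]

lemma getLastD_of_ne_nil {α : Type} (l : List α) (d : α) (h : l ≠ []) :
    l.getLastD d = l.getLast h := by
  cases l with
  | nil => exact absurd rfl h
  | cons a t => simp [List.getLastD_eq_getLast?, List.getLast?_eq_some_getLast]

-- digits recurrence for n ≥ 10, expressed on the statistics
lemma dS_cons (n : Nat) (h : 10 ≤ n) : dS n = (n % 10 : Nat) + dS (n / 10) := by
  unfold dS; rw [Nat.digits_def' (by norm_num) (by omega)]; simp

lemma dL_cons (n : Nat) (h : 10 ≤ n) : dL n = dL (n / 10) + 1 := by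
  unfold dL; rw [Nat.digits_def' (by norm_num) (by omega)]; simp

lemma dF_cons (n : Nat) (h : 10 ≤ n) : dF n = dF (n / 10) := by
  unfold dF; rw [Nat.digits_def' (by norm_num) (by omega),
    getLastD_cons_of_ne_nil _ _ _ (Nat.digits_ne_nil_iff_ne_zero.mpr (by omega))]

lemma dS_bound (n : Nat) (h : 1 ≤ n) : dS n ≤ 9 * (dL n - 1) + dF n := by
  have hne : Nat.digits 10 n ≠ [] := Nat.digits_ne_nil_iff_ne_zero.mpr (by omega)
  have hsplit := List.dropLast_append_getLast hne
  have hsum : (Nat.digits 10 n).sum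
      = ((Nat.digits 10 n).dropLast).sum + (Nat.digits 10 n).getLast hne := by
    conv_lhs => rw [← hsplit]
    simp
  have hb : ((Nat.digits 10 n).dropLast).sum ≤ ((Nat.digits 10 n).dropLast).length * 9 := by
    have := List.sum_le_card_nsmul ((Nat.digits 10 n).dropLast) 9 (by
      intro x hx
      have : x ∈ Nat.digits 10 n := List.mem_of_mem_dropLast hx
      have := Nat.digits_lt_base (by norm_num) this
      omega)
    simpa [Nat.smul_one_eq_cast] using this
  have hlen : ((Nat.digits 10 n).dropLast).length = (Nat.digits 10 n).length - 1 := by simp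
  have hL : 1 ≤ (Nat.digits 10 n).length := List.length_pos_iff.mpr hne
  unfold dS dL dF
  rw [getLastD_of_ne_nil _ _ hne]
  omega

-- ===== A reduced to the closed form =====

lemma length_digits_ge_two (n : Nat) (h : 10 ≤ n) : 2 ≤ (Nat.digits 10 n).length := by
  rw [Nat.digits_def' (by norm_num) (by omega : 0 < n)]
  have : Nat.digits 10 (n / 10) ≠ [] := Nat.digits_ne_nil_iff_ne_zero.mpr (by omega)
  have := List.length_pos_iff.mpr this
  simp; omega

lemma A_closed (n : Nat) (h : 10 ≤ n) :
    myAnswer (n : Int) = max (dS n) (9 * (dL n - 1) + dF n - 1) := by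
  have hts : PySem.Int.toChars (n : Int) = Nat.toDigits 10 n := by
    simp [PySem.Int.toChars]
  have hne : Nat.digits 10 n ≠ [] := Nat.digits_ne_nil_iff_ne_zero.mpr (by omega)
  have hsplit := List.dropLast_append_getLast hne
  set ds := Nat.digits 10 n with hds
  set init := ds.dropLast with hinit
  set lastd := ds.getLast hne with hlast
  have hchars : Nat.toDigits 10 n = Nat.digitChar lastd :: (init.map Nat.digitChar).reverse := by
    rw [toDigits_eq_digits n (by omega), ← hsplit]
    simp
  have hlen2 : 2 ≤ ds.length := length_digits_ge_two n h
  have hlinit : init.length = ds.length - 1 := by simp [hinit]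
  have hdig : ∀ d ∈ ds, d < 10 := fun d hd => Nat.digits_lt_base (by norm_num) hd
  have hmap : ((init.map Nat.digitChar).reverse.map pvDigit)
      = (init.reverse.map (Nat.cast : Nat → Int)) := by
    rw [← List.map_reverse, List.map_map]
    apply List.map_congr_left
    intro d hd
    have hmem : d ∈ ds := List.mem_of_mem_dropLast (by simpa using hd)
    simpa using pvDigit_digitChar d (hdig d hmem)
  have hsumi : (init.reverse.map (Nat.cast : Nat → Int)).sum = ((init.sum : Nat) : Int) := by
    rw [List.map_reverse, List.sum_reverse]
    push_cast
    rfl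
  have hdchar : pvDigit (Nat.digitChar lastd) = (lastd : Int) :=
    pvDigit_digitChar lastd (hdig lastd (List.getLast_mem hne))
  have hdS : dS n = (init.sum : Int) + (lastd : Int) := by
    unfold dS
    conv_lhs => rw [← hsplit]
    push_cast
    simp
  have hdL : dL n = (ds.length : Int) := rfl
  have hdF : dF n = (lastd : Int) := by
    unfold dF
    rw [← hds, getLastD_of_ne_nil _ _ hne]
  have hib : (init.sum : Int) ≤ 9 * ((ds.length : Int) - 1) := by
    have := List.sum_le_card_nsmul init 9 (fun x hx =>
      by have := hdig x (List.mem_of_mem_dropLast hx); omega)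
    simp only [smul_eq_mul] at this
    omega
  unfold myAnswer
  rw [hts, hchars]
  simp only [List.length_cons, List.length_reverse, List.length_map,
    PySem.List.slice_from_one, List.tail_cons, PySem.List.pyGetD_zero_cons]
  rw [foldl_eq_sum_map, hmap, hsumi, hdchar, hdS, hdL, hdF]
  split_ifs with h1 h2 <;> omega

-- uniform max form of G on positive input
lemma G_max (q : Nat) (h : 1 ≤ q) : G q = max (dS q) (9 * (dL q - 1) + dF q - 1) := by
  unfold G
  by_cases hq : q < 10
  · rw [if_pos hq]
    have hdig : Nat.digits 10 q = [q] := by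
      rw [Nat.digits_def' (by norm_num) (by omega), Nat.mod_eq_of_lt hq,
        Nat.div_eq_of_lt hq]
      simp
    unfold dS dL dF
    rw [hdig]
    simp only [List.sum_cons, List.sum_nil, List.length_cons, List.length_nil,
      List.getLastD_cons, List.getLastD_nil]
    push_cast
    omega
  · rw [if_neg hq]

-- key lemma: the best digit sum strictly below q is (first digit of q) - 1 plus all nines
lemma G_pred (q : Nat) (h : 1 ≤ q) : G (q - 1) = 9 * (dL q - 1) + dF q - 1 := by
  induction q using Nat.strong_induction_on with
  | _ q ih =>
    by_cases hq : q ≤ 10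
    · interval_cases q <;> simp_all <;> decide
    · have h10 : 10 ≤ q := by omega
      set a := q / 10 with ha
      set b := q % 10 with hb
      have ha1 : 1 ≤ a := by omega
      have hLq : dL q = dL a + 1 := dL_cons q h10
      have hFq : dF q = dF a := dF_cons q h10
      by_cases hb0 : b = 0
      · -- q = 10a with a ≥ 2; q-1 = 10(a-1) + 9
        have ha2 : 2 ≤ a := by omega
        have hq1 : q - 1 = 10 * (a - 1) + 9 := by omega
        have h10' : 10 ≤ q - 1 := by omega
        have hdiv : (q - 1) / 10 = a - 1 := by omega
        have hmod : (q - 1) % 10 = 9 := by omega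
        have hG : G (q - 1) = max (dS (q - 1)) (9 * (dL (q - 1) - 1) + dF (q - 1) - 1) :=
          G_max (q - 1) (by omega)
        rw [hG, dS_cons (q-1) h10', dL_cons (q-1) h10', dF_cons (q-1) h10', hdiv, hmod]
        have hih := ih a (by omega) ha1
        rw [G_max (a - 1) (by omega)] at hih
        rw [hLq, hFq]
        omega
      · -- q = 10a + b with b ≥ 1; q-1 = 10a + (b-1)
        have h10' : 10 ≤ q - 1 := by omega
        have hdiv : (q - 1) / 10 = a := by omega
        have hmod : ((q - 1) % 10 : Nat) = b - 1 := by omega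
        have hG : G (q - 1) = max (dS (q - 1)) (9 * (dL (q - 1) - 1) + dF (q - 1) - 1) :=
          G_max (q - 1) (by omega)
        rw [hG, dS_cons (q-1) h10', dL_cons (q-1) h10', dF_cons (q-1) h10', hdiv, hmod]
        have hSa := dS_bound a ha1
        have hb9 : b < 10 := by omega
        rw [hLq, hFq]
        have hcast : ((b - 1 : Nat) : Int) = (b : Int) - 1 := by omega
        rw [hcast]
        have hbi : (b : Int) ≤ 9 := by omega
        omega

-- B computes the closed form
lemma B_closed (n : Nat) : myAnswer_alt (n : Int) = G n := by
  induction n using Nat.strong_induction_on with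
  | _ n ih =>
    by_cases hn : n < 10
    · rw [myAnswer_alt, if_pos (by exact_mod_cast hn), G, if_pos hn]
    · have h10 : 10 ≤ n := by omega
      rw [myAnswer_alt, if_neg (by exact_mod_cast hn)]
      have hq : PySem.Int.floordiv ((n : Nat) : Int) 10 = ((n / 10 : Nat) : Int) := by
        rw [PySem.Int.floordiv_eq_ediv_of_pos (by norm_num)]
        omega
      have hr : PySem.Int.mod ((n : Nat) : Int) 10 = ((n % 10 : Nat) : Int) := by
        rw [PySem.Int.mod_eq_emod_of_pos (by norm_num)]
        omega
      have hq1 : 1 ≤ n / 10 := by omega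
      have hcast : ((n / 10 : Nat) : Int) - 1 = ((n / 10 - 1 : Nat) : Int) := by omega
      simp only [hq, hr]
      rw [hcast, ih (n / 10) (by omega), ih (n / 10 - 1) (by omega)]
      rw [G_max (n / 10) hq1, G_pred (n / 10) hq1]
      rw [G, if_neg hn, dS_cons n h10, dL_cons n h10, dF_cons n h10]
      have hr9 : ((n % 10 : Nat) : Int) ≤ 9 := by omega
      omega

lemma A_eq_G (n : Nat) : myAnswer (n : Int) = G n := by
  by_cases hn : n < 10
  · have : G n = (n : Int) := by rw [G, if_pos hn]
    rw [this]
    interval_cases n <;> decide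
  · rw [A_closed n (by omega), G, if_neg hn]

-- ===== VERDICT (by name: the statement is the Claim_ definition above) =====
theorem myAnswer_spec : Claim_equal_myAnswer := by
  intro N _ hpre
  unfold Spec_myAnswer
  have hN : N = ((N.toNat : Nat) : Int) := (Int.toNat_of_nonneg hpre).symm
  rw [hN, A_eq_G, B_closed]
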